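-- pv_equiv track=rewrite | github.com/ilveron/FondProg1 | Scripts/Esercizio (74).py | VerificaRicorsiva
-- ===== SOURCE A (Python) =====
-- def VerificaRicorsiva(Lista, Estratta):
--     if len(Lista) == len(Estratta):
--         if Lista == Estratta:
--             return True
--         else:
--             return False
--     else:
--         Estratta.append(Lista[0])
--         return VerificaRicorsiva(Lista[1:], Estratta)
-- ===== SOURCE B (Python) =====
-- def VerificaRicorsiva(Lista, Estratta):
--     # Closed form: like A, mutates Estratta (extends it with the moved prefix).
--     k = (len(Lista) - len(Estratta)) // 2
--     Estratta.extend(Lista[:k])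
--     return Lista[k:] == Estratta
-- ===== Notes on version B (the rewrite author's own statement) =====
-- stated objective: simpler
-- what changed: Replaces the element-by-element recursion with a closed-form split: compute k = (len(Lista)-len(Estratta))//2 once, extend Estratta with Lista[:k], and compare Lista[k:] with Estratta.
import Mathlib
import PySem

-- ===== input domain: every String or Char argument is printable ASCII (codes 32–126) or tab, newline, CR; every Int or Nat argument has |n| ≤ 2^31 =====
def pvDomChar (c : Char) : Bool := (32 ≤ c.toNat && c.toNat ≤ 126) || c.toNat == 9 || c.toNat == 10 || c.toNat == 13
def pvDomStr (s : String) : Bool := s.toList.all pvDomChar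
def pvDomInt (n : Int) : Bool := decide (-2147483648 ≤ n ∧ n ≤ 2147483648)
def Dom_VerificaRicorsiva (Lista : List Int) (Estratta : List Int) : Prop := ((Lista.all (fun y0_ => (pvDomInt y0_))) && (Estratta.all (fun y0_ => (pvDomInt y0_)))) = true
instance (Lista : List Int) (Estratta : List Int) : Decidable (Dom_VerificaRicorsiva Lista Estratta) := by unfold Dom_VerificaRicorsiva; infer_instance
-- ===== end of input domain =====

-- B replaces A's element-by-element recursion by a closed-form split (k = (len L - len E)//2);
-- like A, the Python B mutates Estratta in place (appends the same k elements); return values proved equal on Pre_.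


-- ===== PORT A =====
-- 'Lista[0]' raises IndexError when Lista is empty: that branch returns false here and is excluded by Pre_.
def VerificaRicorsiva (Lista : List Int) (Estratta : List Int) : Bool :=
  if Lista.length == Estratta.length then
    decide (Lista = Estratta)
  else
    match Lista with
    | [] => false               -- Python: IndexError (outside Pre_)
    | x :: rest => VerificaRicorsiva rest (Estratta ++ [x])
termination_by Lista.length

-- ===== PORT B =====
def VerificaRicorsiva_alt (Lista : List Int) (Estratta : List Int) : Bool :=
  let k : Int := PySem.Int.floordiv ((Lista.length : Int) - (Estratta.length : Int)) 2
  let Estratta' := Estratta ++ PySem.List.slice Lista none (some k)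
  decide (PySem.List.slice Lista (some k) none = Estratta')

-- ===== PRECONDITION & SPEC =====
-- Pre_ excludes exactly the inputs on which A raises IndexError (length difference negative or odd:
-- the recursion then empties Lista without the lengths ever matching and Lista[0] fails).
def Pre_VerificaRicorsiva (Lista : List Int) (Estratta : List Int) : Prop :=
  Estratta.length ≤ Lista.length ∧ (Lista.length - Estratta.length) % 2 = 0
instance (Lista : List Int) (Estratta : List Int) : Decidable (Pre_VerificaRicorsiva Lista Estratta) := by unfold Pre_VerificaRicorsiva; infer_instance
def pvWitness_VerificaRicorsiva : List Int × List Int := ([1, 2, 1, 2], [1, 2])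

def Spec_VerificaRicorsiva (Lista : List Int) (Estratta : List Int) (out : Bool) : Prop := out = VerificaRicorsiva_alt Lista Estratta
instance (Lista : List Int) (Estratta : List Int) (out : Bool) : Decidable (Spec_VerificaRicorsiva Lista Estratta out) := by unfold Spec_VerificaRicorsiva; infer_instance

-- ===== CLAIM (what is proved, stated in full; the proofs are below) =====
def Claim_equal_VerificaRicorsiva : Prop := ∀ (Lista : List Int) (Estratta : List Int), Dom_VerificaRicorsiva Lista Estratta → Pre_VerificaRicorsiva Lista Estratta → Spec_VerificaRicorsiva Lista Estratta (VerificaRicorsiva Lista Estratta)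

-- ===== LEMMAS AND PROOFS =====

-- A, on Pre_, computes exactly the drop/take comparison at k = (|L| - |E|)/2.
theorem verif_eq_droptake (Lista Estratta : List Int)
    (hle : Estratta.length ≤ Lista.length)
    (hpar : (Lista.length - Estratta.length) % 2 = 0) :
    VerificaRicorsiva Lista Estratta =
      decide (Lista.drop ((Lista.length - Estratta.length) / 2)
              = Estratta ++ Lista.take ((Lista.length - Estratta.length) / 2)) := by
  induction Lista generalizing Estratta with
  | nil =>
    have hE : Estratta = [] := List.eq_nil_of_length_eq_zero (Nat.le_zero.mp (by simpa using hle))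
    subst hE; simp [VerificaRicorsiva]
  | cons x rest ih =>
    by_cases hlen : (x :: rest).length = Estratta.length
    · rw [VerificaRicorsiva]
      simp only [hlen]
      simp
    · have hlt : Estratta.length < (x :: rest).length := lt_of_le_of_ne hle (fun h => hlen h.symm)
      have hd2 : Estratta.length + 2 ≤ (x :: rest).length := by
        rcases Nat.lt_or_ge ((x :: rest).length) (Estratta.length + 2) with h | h
        · exfalso
          have : (x :: rest).length - Estratta.length = 1 := by omega
          omega
        · exact h
      rw [VerificaRicorsiva]
      simp only [List.length_cons] at *
      have hne : ¬ (rest.length + 1 == Estratta.length) := by simp; omega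
      rw [if_neg hne]
      have hle' : (Estratta ++ [x]).length ≤ rest.length := by simp; omega
      have hpar' : (rest.length - (Estratta ++ [x]).length) % 2 = 0 := by simp; omega
      rw [ih (Estratta ++ [x]) hle' hpar']
      have hk : ∃ k : Nat, (rest.length + 1 - Estratta.length) / 2 = k + 1 ∧
          (rest.length - (Estratta ++ [x]).length) / 2 = k := by
        refine ⟨(rest.length + 1 - Estratta.length) / 2 - 1, by omega, by simp; omega⟩
      obtain ⟨k, hk1, hk2⟩ := hk
      rw [decide_eq_decide, hk1, hk2]
      simp [List.append_assoc]

-- B unfolds to the same drop/take comparison on Pre_.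
theorem alt_eq_droptake (Lista Estratta : List Int)
    (hle : Estratta.length ≤ Lista.length) :
    VerificaRicorsiva_alt Lista Estratta =
      decide (Lista.drop ((Lista.length - Estratta.length) / 2)
              = Estratta ++ Lista.take ((Lista.length - Estratta.length) / 2)) := by
  simp only [VerificaRicorsiva_alt]
  have hcast : ((Lista.length : Int) - (Estratta.length : Int)) = ((Lista.length - Estratta.length : Nat) : Int) := by
    omega
  rw [hcast]
  rw [show ((2 : Int) = ((2 : Nat) : Int)) from rfl, PySem.Int.floordiv_natCast]
  rw [PySem.List.slice_from_natCast, PySem.List.slice_to_natCast]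

-- ===== VERDICT (by name: the statement is the Claim_ definition above) =====
theorem VerificaRicorsiva_spec : Claim_equal_VerificaRicorsiva := by
  intro Lista Estratta _ hpre
  unfold Spec_VerificaRicorsiva
  rw [verif_eq_droptake Lista Estratta hpre.1 hpre.2, alt_eq_droptake Lista Estratta hpre.1]
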